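-- pv_equiv track=rewrite | github.com/neilstudd/advent-of-code | 2024/day25/day25.py | store_locks_and_keys
-- ===== SOURCE A (Python) =====
-- def store_locks_and_keys(data_file):
--     locks = []
--     keys = []
--     grid = []
--     for line in data_file:
--         if line.strip() == "":
--             if grid:
--                 # Check the first and last line of the grid
--                 if all([c == "#" for c in grid[0]]):
--                     locks.append(grid)
--                 elif all([c == "#" for c in grid[-1]]):
--                     keys.append(grid)
--                 grid = []  # Reset grid for the next block
--         else:
--             grid.append(list(line.strip()))
--
--     # Write out the final grid at end of file
--     if grid:
--         if all([c == "#" for c in grid[0]]):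
--             locks.append(grid)
--         elif all([c == "#" for c in grid[-1]]):
--             keys.append(grid)
--     return locks, keys
-- ===== SOURCE B (Python) =====
-- def store_locks_and_keys(data_file):
--     # Two-pointer scan over the pre-stripped lines: skip blanks, then jump over
--     # the whole non-blank run [i:j] at once and classify that slice as a block.
--     lines = [line.strip() for line in data_file]
--     locks = []
--     keys = []
--     n = len(lines)
--     i = 0
--     while i < n:
--         if lines[i] == "":
--             i += 1
--             continue
--         j = i
--         while j < n and lines[j] != "":
--             j += 1
--         block = [list(row) for row in lines[i:j]]
--         if all(c == "#" for c in block[0]):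
--             locks.append(block)
--         elif all(c == "#" for c in block[-1]):
--             keys.append(block)
--         i = j
--     return locks, keys
-- ===== Notes on version B (the rewrite author's own statement) =====
-- stated objective: alternative
-- what changed: B replaces A's line-at-a-time accumulator (pending grid plus a duplicated end-of-file flush) with a two-pointer scan over pre-stripped lines that skips blanks and extracts each whole non-blank run as a slice, classifying it on the spot.
import Mathlib
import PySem

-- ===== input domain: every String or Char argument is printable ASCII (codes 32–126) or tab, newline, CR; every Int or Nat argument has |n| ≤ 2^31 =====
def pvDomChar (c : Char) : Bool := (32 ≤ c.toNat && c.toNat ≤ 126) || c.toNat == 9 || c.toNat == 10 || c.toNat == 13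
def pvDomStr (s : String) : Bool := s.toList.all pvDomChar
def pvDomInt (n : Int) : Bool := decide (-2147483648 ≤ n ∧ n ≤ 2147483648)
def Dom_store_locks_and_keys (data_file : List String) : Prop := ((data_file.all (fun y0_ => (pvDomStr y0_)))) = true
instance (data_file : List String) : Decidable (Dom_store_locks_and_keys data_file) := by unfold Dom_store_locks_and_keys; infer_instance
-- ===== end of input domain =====

-- B replaces A's line-at-a-time pending-grid accumulator (with its duplicated end-of-file
-- flush) by a two-pointer scan that extracts each whole non-blank run as a slice and
-- classifies it on the spot (objective: alternative, same cost).

-- ===== PORT A =====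
-- list(line.strip()) : each char of the stripped line becomes a one-char string
def pvRow (line : String) : List String :=
  (PySem.Str.strip line).toList.map (fun c => String.ofList [c])

-- all([c == "#" for c in grid[0]])   (only used with grid ≠ [])
def pvFirstAllHash (grid : List (List String)) : Bool :=
  (grid.headD []).all (fun c => c == "#")

-- all([c == "#" for c in grid[-1]])   (only used with grid ≠ [])
def pvLastAllHash (grid : List (List String)) : Bool :=
  ((PySem.List.pyGet? grid (-1)).getD []).all (fun c => c == "#")

-- the flush A performs at a blank line and again at end of file
def pvFlushA (locks keys : List (List (List String))) (grid : List (List String)) :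
    List (List (List String)) × List (List (List String)) :=
  if pvFirstAllHash grid then (locks ++ [grid], keys)
  else if pvLastAllHash grid then (locks, keys ++ [grid])
  else (locks, keys)

-- A's loop body over the state (locks, keys, grid)
def pvStepA (st : List (List (List String)) × List (List (List String)) × List (List String))
    (line : String) :
    List (List (List String)) × List (List (List String)) × List (List String) :=
  let (locks, keys, grid) := st
  if PySem.Str.strip line = "" then
    if grid.isEmpty then (locks, keys, grid)
    else
      let (locks', keys') := pvFlushA locks keys grid
      (locks', keys', [])
  else (locks, keys, grid ++ [pvRow line])

def store_locks_and_keys (data_file : List String) :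
    List (List (List String)) × List (List (List String)) :=
  let (locks, keys, grid) := data_file.foldl pvStepA ([], [], [])
  if grid.isEmpty then (locks, keys)
  else
    let (locks', keys') := pvFlushA locks keys grid
    (locks', keys')

-- ===== PORT B =====
-- list(row) on an already-stripped line
def pvRowS (s : String) : List String := s.toList.map (fun c => String.ofList [c])

-- the inner while loop's continuation test: line is non-blank
def pvNB (s : String) : Bool := s ≠ ""

-- B's two-pointer scan: the outer while over i; the inner while computing j is exactly
-- a span, so 'lines[i:j]' is takeWhile pvNB and the jump 'i = j' is dropWhile pvNB.
def pvParseGo (locks keys : List (List (List String))) :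
    List String → List (List (List String)) × List (List (List String))
  | [] => (locks, keys)
  | l :: rest =>
    if l = "" then pvParseGo locks keys rest
    else
      let block := (l :: rest.takeWhile pvNB).map pvRowS
      let rest' := rest.dropWhile pvNB
      if pvFirstAllHash block then pvParseGo (locks ++ [block]) keys rest'
      else if pvLastAllHash block then pvParseGo locks (keys ++ [block]) rest'
      else pvParseGo locks keys rest'
  termination_by ls => ls.length
  decreasing_by
    all_goals simp only [List.length_cons]
    all_goals first
      | omega
      | exact Nat.lt_succ_of_le (List.length_dropWhile_le _ _)

def store_locks_and_keys_alt (data_file : List String) :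
    List (List (List String)) × List (List (List String)) :=
  pvParseGo [] [] (data_file.map PySem.Str.strip)

-- ===== PRECONDITION & SPEC =====
def Spec_store_locks_and_keys (data_file : List String) (out : List (List (List String)) × List (List (List String))) : Prop := out = store_locks_and_keys_alt data_file
instance (data_file : List String) (out : List (List (List String)) × List (List (List String))) : Decidable (Spec_store_locks_and_keys data_file out) := by unfold Spec_store_locks_and_keys; infer_instance

-- ===== CLAIM =====
def Claim_equal_store_locks_and_keys : Prop := ∀ (data_file : List String), Dom_store_locks_and_keys data_file → Spec_store_locks_and_keys data_file (store_locks_and_keys data_file)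

-- ===== LEMMAS AND PROOFS =====

-- A's final end-of-file flush, as a named function of the loop state
def pvFinishA (st : List (List (List String)) × List (List (List String)) × List (List String)) :
    List (List (List String)) × List (List (List String)) :=
  if st.2.2.isEmpty then (st.1, st.2.1) else pvFlushA st.1 st.2.1 st.2.2

-- A's loop-with-final-flush, rephrased as a recursion over the already-stripped lines
def pvScanA (L K : List (List (List String))) (g : List (List String)) :
    List String → List (List (List String)) × List (List (List String))
  | [] => if g.isEmpty then (L, K) else pvFlushA L K g
  | l :: rest =>
    if l = "" then
      if g.isEmpty then pvScanA L K g rest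
      else pvScanA (pvFlushA L K g).1 (pvFlushA L K g).2 [] rest
    else pvScanA L K (g ++ [pvRowS l]) rest

-- the shape pvScanA takes once the pending grid and the coming run are merged
def pvSform (L K : List (List (List String))) (g : List (List String)) (ls : List String) :
    List (List (List String)) × List (List (List String)) :=
  let b := g ++ (ls.takeWhile pvNB).map pvRowS
  let d := ls.dropWhile pvNB
  if b.isEmpty then pvParseGo L K d
  else pvParseGo (pvFlushA L K b).1 (pvFlushA L K b).2 d

lemma pvParseGo_blank (L K : List (List (List String))) (rest : List String) :
    pvParseGo L K ("" :: rest) = pvParseGo L K rest := by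
  simp [pvParseGo]

lemma pvParseGo_run (L K : List (List (List String))) (l : String) (rest : List String)
    (hl : ¬ l = "") :
    pvParseGo L K (l :: rest) =
      pvParseGo (pvFlushA L K ((l :: rest.takeWhile pvNB).map pvRowS)).1
        (pvFlushA L K ((l :: rest.takeWhile pvNB).map pvRowS)).2
        (rest.dropWhile pvNB) := by
  rw [pvParseGo]
  simp only [hl, reduceIte]
  unfold pvFlushA
  split_ifs <;> simp

lemma pvSform_nil_eq (L K : List (List (List String))) (ls : List String) :
    pvSform L K [] ls = pvParseGo L K ls := by
  cases ls with
  | nil => simp [pvSform, pvParseGo]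
  | cons l rest =>
    by_cases hl : l = ""
    · simp [pvSform, hl, pvNB, pvParseGo_blank]
    · have ht : pvNB l = true := by simp [pvNB, hl]
      simp only [pvSform, List.takeWhile_cons, List.dropWhile_cons, ht, reduceIte,
        List.nil_append, List.map_cons, List.isEmpty_cons, Bool.false_eq_true]
      rw [pvParseGo_run L K l rest hl]
      simp

lemma pvScanA_eq_Sform (ls : List String) :
    ∀ L K g, pvScanA L K g ls = pvSform L K g ls := by
  induction ls with
  | nil =>
    intro L K g
    by_cases hg : g.isEmpty
    · simp [pvScanA, pvSform, hg, pvParseGo]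
    · simp [pvScanA, pvSform, hg, pvParseGo]
  | cons l rest ih =>
    intro L K g
    by_cases hl : l = ""
    · have hnb : pvNB l = false := by simp [pvNB, hl]
      subst hl
      by_cases hg : g.isEmpty
      · have hgnil : g = [] := List.isEmpty_iff.mp hg
        subst hgnil
        simp only [pvScanA, reduceIte, List.isEmpty_nil]
        rw [ih, pvSform_nil_eq]
        simp [pvSform, hnb, pvParseGo_blank]
      · simp only [pvScanA, reduceIte, hg, Bool.false_eq_true]
        rw [ih, pvSform_nil_eq]
        simp only [pvSform, List.takeWhile_cons, List.dropWhile_cons, hnb,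
          Bool.false_eq_true, reduceIte, List.map_nil, List.append_nil]
        rw [if_neg (by simpa using hg)]
        rw [pvParseGo_blank]
    · have ht : pvNB l = true := by simp [pvNB, hl]
      simp only [pvScanA, hl, reduceIte]
      rw [ih]
      simp only [pvSform, List.takeWhile_cons, List.dropWhile_cons, ht, reduceIte,
        List.map_cons]
      have hassoc : g ++ [pvRowS l] ++ (rest.takeWhile pvNB).map pvRowS
           = g ++ (pvRowS l :: (rest.takeWhile pvNB).map pvRowS) := by simp
      rw [hassoc]

-- A's fold followed by its final flush equals pvScanA over the stripped lines
lemma pvFoldA_eq_scan (ls : List String) :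
    ∀ L K g, pvFinishA (ls.foldl pvStepA (L, K, g)) = pvScanA L K g (ls.map PySem.Str.strip) := by
  induction ls with
  | nil => intro L K g; simp [pvFinishA, pvScanA]
  | cons l rest ih =>
    intro L K g
    simp only [List.foldl_cons, List.map_cons]
    by_cases hs : PySem.Str.strip l = ""
    · by_cases hg : g.isEmpty
      · have hA : pvStepA (L, K, g) l = (L, K, g) := by simp [pvStepA, hs, hg]
        rw [hA, ih]
        simp [pvScanA, hs, hg]
      · have hA : pvStepA (L, K, g) l = ((pvFlushA L K g).1, (pvFlushA L K g).2, []) := by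
          simp [pvStepA, hs, hg]
        rw [hA, ih]
        simp [pvScanA, hs, hg]
    · have hA : pvStepA (L, K, g) l = (L, K, g ++ [pvRow l]) := by simp [pvStepA, hs]
      rw [hA, ih]
      have hrow : pvRow l = pvRowS (PySem.Str.strip l) := rfl
      simp [pvScanA, hs, hrow]

-- ===== VERDICT =====
theorem store_locks_and_keys_spec : Claim_equal_store_locks_and_keys := by
  intro data_file _
  show store_locks_and_keys data_file = store_locks_and_keys_alt data_file
  have e : store_locks_and_keys data_file = pvFinishA (data_file.foldl pvStepA ([], [], [])) := by
    unfold store_locks_and_keys pvFinishA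
    rcases data_file.foldl pvStepA ([], [], []) with ⟨a, b, c⟩
    rcases h2 : pvFlushA a b c with ⟨x, y⟩
    by_cases hc : c.isEmpty <;> simp [hc, h2]
  rw [e, pvFoldA_eq_scan, pvScanA_eq_Sform, pvSform_nil_eq]
  rfl
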